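-- pv_equiv track=rewrite | github.com/DU1999/RES-RAG | chunking/example_eval.py | build_vllm_guided_decoding_regex
-- ===== SOURCE A (Python) =====
-- def build_vllm_guided_decoding_regex(num_docs: int, num_chunks: int) -> str:
--     """
--     Constructing regular expressions for vLLM-guided decoding.
--     """
--     if num_docs < 1:
--         raise ValueError("num_docs must be >= 1")
--     if num_chunks < 1:
--         raise ValueError("num_chunks must be >= 1")
--
--     ids = list(range(num_chunks))
--     ids.sort(key=lambda x: (-len(str(x)), x))
--     choices = "|".join(str(i) for i in ids)
--     num_pattern = rf"(?:{choices})"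
--
--     array_pattern = rf"\[{num_pattern}(?:,{num_pattern}){{0,{num_chunks - 1}}}\]"
--
--     doc_entries = []
--     for d in range(num_docs):
--         entry = rf'"Document_{d}":{array_pattern}'
--         doc_entries.append(entry)
--
--     inner = ",".join(doc_entries)
--
--     pattern = r"^\{" + inner + r"\}$"
--     return pattern
-- ===== SOURCE B (Python) =====
-- def build_vllm_guided_decoding_regex(num_docs: int, num_chunks: int) -> str:
--     """
--     Constructing regular expressions for vLLM-guided decoding.
--     Single-pass string builder: ids are emitted directly in descending
--     digit-length, ascending value order (no sort, no intermediate lists),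
--     and the alternation / per-document strings are accumulated in place.
--     """
--     if num_docs < 1:
--         raise ValueError("num_docs must be >= 1")
--     if num_chunks < 1:
--         raise ValueError("num_chunks must be >= 1")
--
--     choices = ""
--     for d in range(len(str(num_chunks - 1)), 0, -1):
--         lo = 0 if d == 1 else 10 ** (d - 1)
--         hi = min(10 ** d, num_chunks)
--         for i in range(lo, hi):
--             if choices == "":
--                 choices += str(i)
--             else:
--                 choices += "|" + str(i)
--
--     num_pattern = "(?:" + choices + ")"
--     array_pattern = "\\[" + num_pattern + "(?:," + num_pattern + "){0," + str(num_chunks - 1) + "}\\]"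
--
--     inner = '"Document_0":' + array_pattern
--     for k in range(1, num_docs):
--         inner += ',"Document_' + str(k) + '":' + array_pattern
--     return "^\\{" + inner + "\\}$"
-- ===== Notes on version B (the rewrite author's own statement) =====
-- stated objective: alternative
-- what changed: A's sort/map/join pipeline (sort ids by (-len(str(x)), x), join them, build a list of doc entries, join it) is replaced by a single-pass in-place string builder: the alternation is emitted directly in descending digit-length buckets (range [10**(d-1), min(10**d, num_chunks)) per length d, the 1-digit bucket from 0), so no sort and no intermediate id or entry lists exist; the per-document string is likewise accumulated in one loop starting from the Document_0 entry.
import Mathlib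
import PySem

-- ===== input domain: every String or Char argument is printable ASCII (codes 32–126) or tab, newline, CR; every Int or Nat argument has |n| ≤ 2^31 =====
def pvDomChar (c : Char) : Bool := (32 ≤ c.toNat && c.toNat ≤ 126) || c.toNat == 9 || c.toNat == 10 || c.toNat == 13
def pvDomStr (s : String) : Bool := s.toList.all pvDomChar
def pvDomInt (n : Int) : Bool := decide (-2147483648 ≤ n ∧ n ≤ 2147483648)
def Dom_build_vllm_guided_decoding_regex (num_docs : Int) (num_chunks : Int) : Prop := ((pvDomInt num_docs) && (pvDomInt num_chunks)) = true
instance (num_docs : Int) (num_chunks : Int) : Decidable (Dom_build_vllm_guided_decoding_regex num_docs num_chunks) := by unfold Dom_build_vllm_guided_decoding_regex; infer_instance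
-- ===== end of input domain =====

-- B replaces A's sort-map-join pipeline by a single-pass string builder: ids are emitted
-- directly in descending digit-length, ascending value order (no sort, no intermediate id or
-- entry lists) and the alternation and per-document strings are accumulated in place.
-- Equivalence is claimed on num_docs ≥ 1 ∧ num_chunks ≥ 1 (elsewhere the Python A raises
-- ValueError).

-- ===== PORT A =====
def build_vllm_guided_decoding_regex (num_docs : Int) (num_chunks : Int) : String :=
  -- A raises ValueError when num_docs < 1 or num_chunks < 1: those inputs are excluded by Pre_
  let ids := PySem.List.pyRange 0 num_chunks 1
  let ids := PySem.List.sorted2 ids (fun x => -(PySem.Str.len (PySem.Int.toStr x))) (fun x => x)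
  let choices := PySem.Str.join "|" (ids.map (fun i => PySem.Int.toStr i))
  let num_pattern := "(?:" ++ choices ++ ")"
  let array_pattern := "\\[" ++ num_pattern ++ "(?:," ++ num_pattern ++ "){0," ++ PySem.Int.toStr (num_chunks - 1) ++ "}\\]"
  let doc_entries := (PySem.List.pyRange 0 num_docs 1).foldl
      (fun acc d => acc ++ ["\"Document_" ++ PySem.Int.toStr d ++ "\":" ++ array_pattern]) []
  let inner := PySem.Str.join "," doc_entries
  "^\\{" ++ inner ++ "\\}$"

-- ===== PORT B =====
def build_vllm_guided_decoding_regex_alt (num_docs : Int) (num_chunks : Int) : String :=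
  -- B raises the same ValueErrors when num_docs < 1 or num_chunks < 1: excluded by Pre_
  let choices := (PySem.List.pyRange (PySem.Str.len (PySem.Int.toStr (num_chunks - 1))) 0 (-1)).foldl
      (fun choices d =>
        (PySem.List.pyRange (if d = 1 then 0 else (10:Int) ^ (d - 1).toNat)
            (min ((10:Int) ^ d.toNat) num_chunks) 1).foldl
          (fun choices i =>
            if choices = "" then choices ++ PySem.Int.toStr i
            else choices ++ "|" ++ PySem.Int.toStr i) choices) ""
  let num_pattern := "(?:" ++ choices ++ ")"
  let array_pattern := "\\[" ++ num_pattern ++ "(?:," ++ num_pattern ++ "){0," ++ PySem.Int.toStr (num_chunks - 1) ++ "}\\]"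
  let inner := (PySem.List.pyRange 1 num_docs 1).foldl
      (fun inner k => inner ++ ",\"Document_" ++ PySem.Int.toStr k ++ "\":" ++ array_pattern)
      ("\"Document_0\":" ++ array_pattern)
  "^\\{" ++ inner ++ "\\}$"

-- ===== PRECONDITION & SPEC =====
-- Pre_ excludes exactly the inputs on which the Python A raises ValueError (num_docs < 1 or num_chunks < 1)
def Pre_build_vllm_guided_decoding_regex (num_docs : Int) (num_chunks : Int) : Prop :=
  1 ≤ num_docs ∧ 1 ≤ num_chunks
instance (num_docs : Int) (num_chunks : Int) : Decidable (Pre_build_vllm_guided_decoding_regex num_docs num_chunks) := by unfold Pre_build_vllm_guided_decoding_regex; infer_instance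
def pvWitness_build_vllm_guided_decoding_regex : Int × Int := (2, 12)
def Spec_build_vllm_guided_decoding_regex (num_docs : Int) (num_chunks : Int) (out : String) : Prop := out = build_vllm_guided_decoding_regex_alt num_docs num_chunks
instance (num_docs : Int) (num_chunks : Int) (out : String) : Decidable (Spec_build_vllm_guided_decoding_regex num_docs num_chunks out) := by unfold Spec_build_vllm_guided_decoding_regex; infer_instance

-- ===== CLAIM (what is proved, stated in full; the proofs are below) =====
def Claim_equal_build_vllm_guided_decoding_regex : Prop := ∀ (num_docs : Int) (num_chunks : Int), Dom_build_vllm_guided_decoding_regex num_docs num_chunks → Pre_build_vllm_guided_decoding_regex num_docs num_chunks → Spec_build_vllm_guided_decoding_regex num_docs num_chunks (build_vllm_guided_decoding_regex num_docs num_chunks)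

-- ===== LEMMAS AND PROOFS =====

-- number of characters of str(x) (proof-only abbreviation)
def pvDlen (x : Int) : Int := PySem.Str.len (PySem.Int.toStr x)

-- the boolean "strictly before" order induced by A's sort key (-len(str(x)), x)
def pvLt (a b : Int) : Bool :=
  decide ((-(pvDlen a)) < -(pvDlen b)) || (!decide ((-(pvDlen b)) < -(pvDlen a)) && decide (a < b))

-- B's bucket of ids with exactly d decimal digits (clamped to n = num_chunks)
def pvBucket (n d : Int) : List Int :=
  PySem.List.pyRange (if d = 1 then 0 else (10:Int) ^ (d - 1).toNat) (min ((10:Int) ^ d.toNat) n) 1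

lemma pvToDigitsCore_length (f : Nat) : ∀ n : Nat, 0 < f → n < 10 ^ f →
    (Nat.toDigitsCore 10 f n []).length = Nat.log 10 n + 1 := by
  induction f with
  | zero => intro n hf _; omega
  | succ f ih =>
    intro n _ h
    rw [Nat.toDigitsCore]
    by_cases h10 : n / 10 = 0
    · have hn : n < 10 := by omega
      simp [h10, Nat.log_eq_zero_iff.mpr (Or.inl hn)]
    · have hn : 10 ≤ n := by omega
      simp only [h10, if_false]
      rw [Nat.toDigitsCore_lens_eq]
      have hpow : 10 ^ (f + 1) = 10 ^ f * 10 := by ring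
      have hdiv : n / 10 < 10 ^ f := Nat.div_lt_of_lt_mul (by omega)
      have hf : 0 < f := by
        rcases Nat.eq_zero_or_pos f with h0 | h0
        · subst h0; simp at h; omega
        · exact h0
      rw [ih (n / 10) hf hdiv]
      have hlog : Nat.log 10 (n / 10) = Nat.log 10 n - 1 := Nat.log_div_base 10 n
      have hpos : 0 < Nat.log 10 n := Nat.log_pos (by omega) hn
      omega

lemma pvDlen_eq (x : Int) (hx : 0 ≤ x) : pvDlen x = (Nat.log 10 x.toNat : Int) + 1 := by
  unfold pvDlen PySem.Str.len
  rw [PySem.Int.toList_toStr]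
  unfold PySem.Int.toChars
  rw [if_neg (by omega)]
  have : (Nat.toDigits 10 x.toNat).length = Nat.log 10 x.toNat + 1 := by
    rw [Nat.toDigits]
    exact pvToDigitsCore_length (x.toNat + 1) x.toNat (by omega)
      (lt_of_lt_of_le (Nat.lt_pow_self (by norm_num))
        (Nat.pow_le_pow_right (by norm_num) (by omega)))
  rw [this]; push_cast; ring

lemma pvDlen_bucket (d : Nat) (hd : 1 ≤ d) (x : Int)
    (h1 : (if (d : Int) = 1 then 0 else (10:Int) ^ (d - 1)) ≤ x) (h2 : x < (10:Int) ^ d) :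
    pvDlen x = d := by
  by_cases hd1 : d = 1
  · subst hd1
    norm_num at h1
    rw [pvDlen_eq x h1]
    have : x.toNat < 10 := by omega
    rw [Nat.log_eq_zero_iff.mpr (Or.inl this)]
    simp
  · rw [if_neg (by exact_mod_cast hd1)] at h1
    have hx0 : 0 ≤ x := le_trans (by positivity) h1
    rw [pvDlen_eq x hx0]
    have hlo : 10 ^ (d - 1) ≤ x.toNat := by
      have : ((10:Int) ^ (d-1)) = ((10 ^ (d-1) : Nat) : Int) := by push_cast; ring
      omega
    have hhi : x.toNat < 10 ^ d := by
      have : ((10:Int) ^ d) = ((10 ^ d : Nat) : Int) := by push_cast; ring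
      omega
    rw [Nat.log_eq_of_pow_le_of_lt_pow hlo (by
      have : d - 1 + 1 = d := by omega
      rw [this]; exact hhi)]
    omega

lemma pvDlen_mem_bucket (n d : Int) (hd : 1 ≤ d) (x : Int) (hx : x ∈ pvBucket n d) :
    pvDlen x = d := by
  unfold pvBucket at hx
  rw [PySem.List.mem_pyRange_one] at hx
  have he : ((d.toNat : Int)) = d := by omega
  have := pvDlen_bucket d.toNat (by omega) x ?_ ?_
  · rw [this, he]
  · rw [he]
    have : (d.toNat - 1) = (d - 1).toNat := by omega
    rw [this]
    exact hx.1
  · calc x < min ((10:Int) ^ d.toNat) n := hx.2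
      _ ≤ (10:Int) ^ d.toNat := min_le_left _ _

lemma pvLt_iff (a b : Int) : pvLt a b = true ↔ pvDlen b < pvDlen a ∨ (pvDlen a = pvDlen b ∧ a < b) := by
  unfold pvLt; simp; omega

lemma pvLt_asym {a b : Int} (h : pvLt a b = true) : pvLt b a = false := by
  rw [pvLt_iff] at h; rw [Bool.eq_false_iff]; rw [Ne, pvLt_iff]; omega

lemma pvLt_trans {a b c : Int} (h1 : pvLt a b = true) (h2 : pvLt b c = true) : pvLt a c = true := by
  rw [pvLt_iff] at *; omega

lemma pvInsert_pairwise (x : Int) (ys : List Int)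
    (h : ys.Pairwise (fun a b => pvLt b a = false)) :
    (PySem.List.insertBy pvLt x ys).Pairwise (fun a b => pvLt b a = false) := by
  induction ys with
  | nil => simp [PySem.List.insertBy]
  | cons y ys ih =>
    rw [PySem.List.insertBy]
    rw [List.pairwise_cons] at h
    by_cases hxy : pvLt x y = true
    · rw [if_pos hxy]
      refine List.Pairwise.cons ?_ (List.Pairwise.cons h.1 h.2)
      intro w hw
      rcases hw with _ | hw
      · exact pvLt_asym hxy
      · have hwy := h.1 w (by assumption)
        rw [Bool.eq_false_iff]
        intro hwx
        have := pvLt_trans hwx hxy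
        rw [this] at hwy; exact Bool.noConfusion hwy
    · rw [if_neg hxy]
      refine List.Pairwise.cons ?_ (ih h.2)
      intro w hw
      rw [PySem.List.insertBy_mem_iff (before := pvLt) (x := x) (ys := ys) (y := w)] at hw
      rcases hw with rfl | hw
      · exact Bool.eq_false_iff.mpr hxy
      · exact h.1 w hw

lemma pvFoldl_pairwise (xs : List Int) : ∀ acc : List Int,
    acc.Pairwise (fun a b => pvLt b a = false) →
    (List.foldl (fun acc x => PySem.List.insertBy pvLt x acc) acc xs).Pairwise
      (fun a b => pvLt b a = false) := by
  induction xs with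
  | nil => intro acc h; exact h
  | cons x xs ih => intro acc h; exact ih _ (pvInsert_pairwise x acc h)

lemma pvBuckets_concat (n : Int) (hn : 1 ≤ n) : ∀ D : Nat, 1 ≤ D →
    List.flatMap (pvBucket n) (PySem.List.pyRange 1 ((D : Int) + 1) 1)
      = PySem.List.pyRange 0 (min ((10:Int) ^ D) n) 1 := by
  intro D
  induction D with
  | zero => omega
  | succ D ih =>
    intro _
    by_cases hD : 1 ≤ D
    · have hsplit : PySem.List.pyRange 1 ((D:Int) + 1 + 1) 1
          = PySem.List.pyRange 1 ((D:Int) + 1) 1 ++ [(D:Int) + 1] :=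
        PySem.List.pyRange_one_succ_right (by omega)
      have hcast : ((D + 1 : Nat) : Int) + 1 = ((D:Int) + 1 + 1) := by push_cast; ring
      rw [hcast, hsplit, List.flatMap_append, ih hD]
      have hbucket : pvBucket n ((D:Int)+1)
          = PySem.List.pyRange ((10:Int) ^ D) (min ((10:Int) ^ (D+1)) n) 1 := by
        unfold pvBucket
        rw [if_neg (by omega)]
        have h1 : ((D:Int) + 1 - 1).toNat = D := by omega
        have h2 : ((D:Int) + 1).toNat = D + 1 := by omega
        rw [h1, h2]
      simp only [List.flatMap_cons, List.flatMap_nil, List.append_nil, hbucket]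
      have hp : (0:Int) < (10:Int) ^ D := by positivity
      by_cases hcase : n ≤ (10:Int) ^ D
      · have hmin1 : min ((10:Int) ^ D) n = n := by omega
        have hmin2 : min ((10:Int) ^ (D+1)) n = n := by
          have : (10:Int) ^ D ≤ (10:Int) ^ (D+1) := by
            rw [pow_succ]; nlinarith
          omega
        rw [hmin1, hmin2]
        rw [show PySem.List.pyRange ((10:Int)^D) n = [] from PySem.List.pyRange_one_eq_nil (by omega)]
        simp
      · have hmin1 : min ((10:Int) ^ D) n = (10:Int) ^ D := by omega
        rw [hmin1]
        rw [← PySem.List.pyRange_one_append 0 ((10:Int)^D) (min ((10:Int) ^ (D+1)) n) (by omega) ?_]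
        have : (10:Int) ^ D ≤ (10:Int) ^ (D+1) := by rw [pow_succ]; nlinarith
        omega
    · have hD0 : D = 0 := by omega
      subst hD0
      rw [show (((0:Nat)+1 : Nat) : Int) + 1 = 2 by norm_num]
      rw [show PySem.List.pyRange 1 2 1 = [1] from PySem.List.pyRange_one_singleton 1]
      simp only [List.flatMap_cons, List.flatMap_nil, List.append_nil]
      unfold pvBucket
      norm_num

lemma pvBuckets_pairwise (n : Int) (maxd : Int) :
    (List.flatMap (pvBucket n) (PySem.List.pyRange maxd 0 (-1))).Pairwise
      (fun a b => pvLt a b = true) := by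
  rw [List.flatMap_def, List.pairwise_flatten]
  constructor
  · -- each bucket is pairwise pvLt (equal digit count, increasing value)
    intro l hl
    rw [List.mem_map] at hl
    obtain ⟨d, hd, rfl⟩ := hl
    rw [PySem.List.pyRange_neg_one_eq_reverse, List.mem_reverse, PySem.List.mem_pyRange_one] at hd
    refine List.Pairwise.imp_of_mem ?_ (PySem.List.pairwise_lt_pyRange_one _ _)
    intro a b ha hb hab
    rw [pvLt_iff]
    right
    exact ⟨by rw [pvDlen_mem_bucket n d hd.1 a ha, pvDlen_mem_bucket n d hd.1 b hb], hab⟩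
  · -- buckets with more digits come first
    rw [List.pairwise_map, PySem.List.pyRange_neg_one_eq_reverse, List.pairwise_reverse]
    refine List.Pairwise.imp_of_mem ?_ (PySem.List.pairwise_lt_pyRange_one _ _)
    intro d2 d1 hd2 hd1 hlt x hx y hy
    rw [PySem.List.mem_pyRange_one] at hd1 hd2
    rw [pvLt_iff]
    left
    rw [pvDlen_mem_bucket n d1 hd1.1 x hx, pvDlen_mem_bucket n d2 hd2.1 y hy]
    exact hlt

lemma pvIds_eq (n : Int) (hn : 1 ≤ n) :
    PySem.List.sorted2 (PySem.List.pyRange 0 n 1)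
        (fun x => -(PySem.Str.len (PySem.Int.toStr x))) (fun x => x)
      = List.flatMap (pvBucket n) (PySem.List.pyRange (PySem.Str.len (PySem.Int.toStr (n - 1))) 0 (-1)) := by
  have hL : PySem.List.sorted2 (PySem.List.pyRange 0 n 1)
        (fun x => -(PySem.Str.len (PySem.Int.toStr x))) (fun x => x)
      = List.foldl (fun acc x => PySem.List.insertBy pvLt x acc) [] (PySem.List.pyRange 0 n 1) := rfl
  rw [hL]
  -- digit count of n-1 and the bound n ≤ 10 ^ maxd
  have hmd : pvDlen (n - 1) = (Nat.log 10 (n-1).toNat : Int) + 1 := pvDlen_eq (n-1) (by omega)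
  set M : Nat := Nat.log 10 (n-1).toNat + 1 with hM
  have hmd' : pvDlen (n - 1) = (M : Int) := by rw [hmd, hM]; omega
  have hnle : n ≤ (10:Int) ^ M := by
    have h1 : (n-1).toNat < 10 ^ M := Nat.lt_pow_succ_log_self (by norm_num) (n-1).toNat
    have h2 : ((10:Int) ^ M) = ((10 ^ M : Nat) : Int) := by push_cast; ring
    omega
  -- the descending bucket concatenation is a permutation of range(n)
  have hperm : (List.flatMap (pvBucket n) (PySem.List.pyRange (pvDlen (n - 1)) 0 (-1))).Perm
      (PySem.List.pyRange 0 n 1) := by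
    rw [hmd', PySem.List.pyRange_neg_one_eq_reverse]
    rw [show (0:Int) + 1 = 1 by norm_num]
    have : List.flatMap (pvBucket n) (PySem.List.pyRange 1 ((M:Int) + 1) 1).reverse
        = ((PySem.List.pyRange 1 ((M:Int) + 1) 1).map (pvBucket n)).reverse.flatten := by
      rw [List.flatMap_def, List.map_reverse]
    rw [this]
    refine List.Perm.trans (List.reverse_perm _).flatten ?_
    rw [← List.flatMap_def, pvBuckets_concat n hn M (by omega)]
    rw [min_eq_right hnle]
  -- the left side is a permutation of range(n) too
  have hpermL : (List.foldl (fun acc x => PySem.List.insertBy pvLt x acc) []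
      (PySem.List.pyRange 0 n 1)).Perm (PySem.List.pyRange 0 n 1) := by
    have := PySem.List.foldl_insertBy_perm pvLt (PySem.List.pyRange 0 n 1) []
    simpa using this
  -- both sides are sorted (weakly) by pvLt
  have hpwL := pvFoldl_pairwise (PySem.List.pyRange 0 n 1) [] (List.Pairwise.nil)
  have hpwR : (List.flatMap (pvBucket n) (PySem.List.pyRange (pvDlen (n - 1)) 0 (-1))).Pairwise
      (fun a b => pvLt b a = false) :=
    List.Pairwise.imp (fun h => pvLt_asym h) (pvBuckets_pairwise n (pvDlen (n - 1)))
  -- a permutation class has a unique weakly sorted member (the order is antisymmetric)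
  refine List.Perm.eq_of_pairwise ?_ hpwL hpwR (hpermL.trans hperm.symm)
  intro a b _ _ h1 h2
  have ha := Bool.eq_false_iff.mp h2
  have hb := Bool.eq_false_iff.mp h1
  rw [Ne, pvLt_iff] at ha hb
  omega

-- ===== string-building lemmas (B's in-place accumulation vs A's map + join) =====

lemma pvAppend_ne_empty (s t : String) (h : s ≠ "") : s ++ t ≠ "" := by
  intro he
  have h2 : (s ++ t).toList = ("":String).toList := by rw [he]
  simp at h2
  exact h h2.1

lemma pvJoin_singleton (sep x : String) : PySem.Str.join sep [x] = x := by
  simp [PySem.Str.join, PySem.Chars.join_singleton]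

lemma pvJoin_cons_append (sep s t : String) (m : List String) :
    PySem.Str.join sep ((s ++ t) :: m) = s ++ PySem.Str.join sep (t :: m) := by
  cases m with
  | nil => simp [PySem.Str.join, PySem.Chars.join_singleton]
  | cons y m => simp [pysem, PySem.Str.join, PySem.Chars.join_cons_cons]

lemma pvJoin_cons_cons (sep x y : String) (xs : List String) :
    PySem.Str.join sep (x :: y :: xs) = x ++ sep ++ PySem.Str.join sep (y :: xs) := by
  simp only [PySem.Str.join, List.map_cons, PySem.Chars.join_cons_cons, List.append_assoc,
    String.ofList_append, String.ofList_toList]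
  rw [String.append_assoc]

lemma pvFoldSep {α : Type} (sep : String) (f : α → String) :
    ∀ (xs : List α) (s : String),
      List.foldl (fun s y => s ++ sep ++ f y) s xs = PySem.Str.join sep (s :: xs.map f) := by
  intro xs
  induction xs with
  | nil => intro s; simp [pvJoin_singleton]
  | cons x xs ih =>
    intro s
    simp only [List.foldl_cons, List.map_cons]
    rw [ih, String.append_assoc, pvJoin_cons_append, pvJoin_cons_append, ← String.append_assoc, pvJoin_cons_cons]

lemma pvFoldSepIf {α : Type} (sep : String) (f : α → String) :
    ∀ (xs : List α) (s : String), s ≠ "" →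
      List.foldl (fun s y => if s = "" then s ++ f y else s ++ sep ++ f y) s xs
        = List.foldl (fun s y => s ++ sep ++ f y) s xs := by
  intro xs
  induction xs with
  | nil => intro s _; rfl
  | cons x xs ih =>
    intro s hs
    simp only [List.foldl_cons, if_neg hs]
    exact ih (s ++ sep ++ f x) (pvAppend_ne_empty _ _ (pvAppend_ne_empty _ _ hs))

lemma pvToStr_ne_empty (x : Int) (hx : 0 ≤ x) : PySem.Int.toStr x ≠ "" := by
  intro he
  have h1 : pvDlen x = 0 := by
    unfold pvDlen
    rw [he]; rfl
  have h2 := pvDlen_eq x hx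
  omega

-- B's if-guarded string fold over a nonempty list of nonnegative ids equals A's "|".join
lemma pvChoices_eq (ids : List Int) (hne : ids ≠ []) (hpos : ∀ x ∈ ids, 0 ≤ x) :
    List.foldl (fun s i => if s = "" then s ++ PySem.Int.toStr i else s ++ "|" ++ PySem.Int.toStr i) "" ids
      = PySem.Str.join "|" (ids.map (fun i => PySem.Int.toStr i)) := by
  cases ids with
  | nil => exact absurd rfl hne
  | cons x xs =>
    rw [List.foldl_cons, if_pos rfl, String.empty_append]
    rw [List.map_cons]
    have hx : PySem.Int.toStr x ≠ "" := pvToStr_ne_empty x (hpos x (by simp))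
    rw [pvFoldSepIf "|" (fun i => PySem.Int.toStr i) xs _ hx]
    exact pvFoldSep "|" (fun i => PySem.Int.toStr i) xs (PySem.Int.toStr x)


-- B's nested choices fold equals A's "|".join over the sorted id list
lemma pvChoicesB_eq (n : Int) (hn : 1 ≤ n) :
    List.foldl
        (fun choices d =>
          (PySem.List.pyRange (if d = 1 then 0 else (10:Int) ^ (d - 1).toNat)
              (min ((10:Int) ^ d.toNat) n) 1).foldl
            (fun choices i =>
              if choices = "" then choices ++ PySem.Int.toStr i
              else choices ++ "|" ++ PySem.Int.toStr i) choices)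
        "" (PySem.List.pyRange (PySem.Str.len (PySem.Int.toStr (n - 1))) 0 (-1))
      = PySem.Str.join "|"
          ((PySem.List.sorted2 (PySem.List.pyRange 0 n 1)
              (fun x => -(PySem.Str.len (PySem.Int.toStr x))) (fun x => x)).map
            (fun i => PySem.Int.toStr i)) := by
  rw [pvIds_eq n hn]
  have h1 : List.foldl
        (fun choices d =>
          (PySem.List.pyRange (if d = 1 then 0 else (10:Int) ^ (d - 1).toNat)
              (min ((10:Int) ^ d.toNat) n) 1).foldl
            (fun choices i =>
              if choices = "" then choices ++ PySem.Int.toStr i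
              else choices ++ "|" ++ PySem.Int.toStr i) choices)
        "" (PySem.List.pyRange (PySem.Str.len (PySem.Int.toStr (n - 1))) 0 (-1))
      = List.foldl
          (fun choices i =>
            if choices = "" then choices ++ PySem.Int.toStr i
            else choices ++ "|" ++ PySem.Int.toStr i)
          "" (List.flatMap (pvBucket n)
              (PySem.List.pyRange (PySem.Str.len (PySem.Int.toStr (n - 1))) 0 (-1))) :=
    List.foldl_flatMap.symm
  rw [h1]
  refine pvChoices_eq _ ?_ ?_
  · -- the concatenated buckets are a permutation of range(n), hence nonempty
    have hids := pvIds_eq n hn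
    rw [← hids]
    intro hnil
    have hperm := PySem.List.sorted2_perm (PySem.List.pyRange 0 n 1)
      (fun x => -(PySem.Str.len (PySem.Int.toStr x))) (fun x => x) false
    rw [hnil] at hperm
    have := hperm.length_eq
    rw [PySem.List.pyRange_one_cons (show (0:Int) < n by omega)] at this
    simp at this
  · intro x hx
    rw [List.mem_flatMap] at hx
    obtain ⟨d, _, hxb⟩ := hx
    unfold pvBucket at hxb
    rw [PySem.List.mem_pyRange_one] at hxb
    have h := hxb.1
    split_ifs at h with h1
    · omega
    · have : (0:Int) ≤ (10:Int) ^ (d - 1).toNat := by positivity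
      omega

-- B's in-place document accumulation equals A's ",".join over the entry list
lemma pvInner_eq (nd : Int) (hd : 1 ≤ nd) (ap : String) :
    PySem.Str.join ","
        (List.foldl
          (fun acc d => acc ++ ["\"Document_" ++ PySem.Int.toStr d ++ "\":" ++ ap]) []
          (PySem.List.pyRange 0 nd 1))
      = List.foldl
          (fun inner k => inner ++ ",\"Document_" ++ PySem.Int.toStr k ++ "\":" ++ ap)
          ("\"Document_0\":" ++ ap) (PySem.List.pyRange 1 nd 1) := by
  rw [PySem.List.foldl_append_singleton_eq_map, List.nil_append]
  rw [PySem.List.pyRange_one_cons (show (0:Int) < nd by omega)]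
  rw [show (0:Int) + 1 = 1 from by decide, List.map_cons]
  have hstep : (fun (inner : String) (k : Int) =>
        inner ++ ",\"Document_" ++ PySem.Int.toStr k ++ "\":" ++ ap)
      = (fun (s : String) (k : Int) =>
          s ++ "," ++ ("\"Document_" ++ PySem.Int.toStr k ++ "\":" ++ ap)) := by
    funext s k
    simp only [String.append_assoc]
    rw [show (",\"Document_" : String) = "," ++ "\"Document_" from by decide, String.append_assoc]
  rw [hstep, pvFoldSep "," (fun d => "\"Document_" ++ PySem.Int.toStr d ++ "\":" ++ ap)]
  rw [show PySem.Int.toStr 0 = "0" from by decide]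
  rw [show ("\"Document_" : String) ++ "0" ++ "\":" = "\"Document_0\":" from by decide]

-- ===== VERDICT (by name: the statement is the Claim_ definition above) =====
theorem build_vllm_guided_decoding_regex_spec : Claim_equal_build_vllm_guided_decoding_regex := by
  intro num_docs num_chunks _ hpre
  unfold Spec_build_vllm_guided_decoding_regex
  simp only [build_vllm_guided_decoding_regex, build_vllm_guided_decoding_regex_alt]
  rw [← pvChoicesB_eq num_chunks hpre.2]
  rw [pvInner_eq num_docs hpre.1]
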